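-- pv_equiv track=rewrite | github.com/xgui3783/siibra-explorer-toolsuite | siibra_explorer_toolsuite/util.py | encode_int
-- ===== SOURCE A (Python) =====
-- import math
--
-- cipher = '0123456789ABCDEFGHIJKLMNOPQRSTUVWXYZabcdefghijklmnopqrstuvwxyz_-'
--
-- neg = '~'
--
-- def encode_int(n):
--     if not isinstance(n, int):
--         raise ValueError('Cannot encode int')
--
--     residual=None
--     result=''
--     if n < 0:
--         result += neg
--         residual = n * -1
--     else:
--         residual = n
--
--     while True:
--         result = cipher[residual % 64] + result
--         residual = math.floor(residual / 64)
--
--         if residual == 0: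
--             break
--     return result
-- ===== SOURCE B (Python) =====
-- import math
--
-- cipher = '0123456789ABCDEFGHIJKLMNOPQRSTUVWXYZabcdefghijklmnopqrstuvwxyz_-'
--
-- neg = '~'
--
-- def encode_int(n):
--     if not isinstance(n, int):
--         raise ValueError('Cannot encode int')
--     if n < 0:
--         return encode_int(-n) + neg  # A seeds result with neg then prepends digits, so the marker ends up trailing
--     q, r = divmod(n, 64)
--     if q == 0:
--         return cipher[r]
--     return encode_int(q) + cipher[r]
-- ===== Notes on version B (the rewrite author's own statement) =====
-- stated objective: simpler
-- what changed: Replaced the explicit while-loop with string-prefix accumulator by direct recursion on the quotient (divmod), emitting digits most-significant-first via return-value concatenation; the negative case becomes a single recursive call.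
import Mathlib
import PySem

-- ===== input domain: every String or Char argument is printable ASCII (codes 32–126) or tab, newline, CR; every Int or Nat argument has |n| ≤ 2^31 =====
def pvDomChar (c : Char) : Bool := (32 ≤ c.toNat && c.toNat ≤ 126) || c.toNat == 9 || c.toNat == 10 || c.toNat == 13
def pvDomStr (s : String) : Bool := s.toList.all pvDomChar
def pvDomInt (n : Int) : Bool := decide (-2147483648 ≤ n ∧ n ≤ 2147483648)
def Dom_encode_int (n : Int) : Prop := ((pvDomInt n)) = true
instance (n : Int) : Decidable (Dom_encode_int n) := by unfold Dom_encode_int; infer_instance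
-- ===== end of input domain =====

-- B replaces A's while-loop with prefix accumulator by direct recursion on the quotient (simpler decomposition, same cost).
-- Both ports compute the RETURN value only; neither Python mutates its argument.

-- module constant: the 64-character digit alphabet
def cipher : String := "0123456789ABCDEFGHIJKLMNOPQRSTUVWXYZabcdefghijklmnopqrstuvwxyz_-"

-- cipher[r] as a one-character string; exact for 0 ≤ r < 64, the only indices either Python reaches
def pvDigit (r : Nat) : String := String.ofList [cipher.toList.getD r '0']

-- ===== PORT A =====
-- A's while-loop. The loop variable `residual` is nonnegative at every reachable state
-- (A takes |n| first), so it is carried as a Nat; `math.floor(residual / 64)` is exact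
-- floor division for |n| ≤ 2^53, hence Nat division here (Dom caps |n| at 2^31).
def encode_int_go (residual : Nat) (result : String) : String :=
  let result := pvDigit (residual % 64) ++ result
  let residual' := residual / 64
  if _h : residual' = 0 then result else encode_int_go residual' result
termination_by residual
decreasing_by exact Nat.div_lt_self (by omega) (by norm_num)

def encode_int (n : Int) : String :=
  -- `if n < 0: result += neg; residual = n * -1 else residual = n`, then the while loop
  if n < 0 then encode_int_go (-n).toNat "~" else encode_int_go n.toNat ""

-- ===== PORT B =====
-- recursion on the quotient q = n // 64
def encode_int_alt_go (n : Nat) : String :=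
  let q := n / 64
  let r := n % 64
  if _h : q = 0 then pvDigit r else encode_int_alt_go q ++ pvDigit r
termination_by n
decreasing_by exact Nat.div_lt_self (by omega) (by norm_num)

def encode_int_alt (n : Int) : String :=
  if n < 0 then encode_int_alt (-n) ++ "~" else encode_int_alt_go n.toNat
termination_by (if n < 0 then 1 else 0)
decreasing_by simp_all; omega

-- ===== PRECONDITION & SPEC =====
def Spec_encode_int (n : Int) (out : String) : Prop := out = encode_int_alt n
instance (n : Int) (out : String) : Decidable (Spec_encode_int n out) := by unfold Spec_encode_int; infer_instance

-- ===== CLAIM (what is proved, stated in full; the proofs are below) =====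
def Claim_equal_encode_int : Prop := ∀ (n : Int), Dom_encode_int n → Spec_encode_int n (encode_int n)

-- ===== LEMMAS AND PROOFS =====

-- A's accumulator loop produces B's recursion result appended with the seed
theorem encode_int_go_eq (residual : Nat) (result : String) :
    encode_int_go residual result = encode_int_alt_go residual ++ result := by
  induction residual using Nat.strong_induction_on generalizing result with
  | _ r ih =>
    rw [encode_int_go, encode_int_alt_go]
    by_cases h : r / 64 = 0
    · simp [h]
    · simp only [h, dif_neg, not_false_iff]
      rw [ih (r / 64) (Nat.div_lt_self (by omega) (by norm_num)),
        String.append_assoc]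

-- ===== VERDICT (by name: the statement is the Claim_ definition above) =====
theorem encode_int_spec : Claim_equal_encode_int := by
  intro n _
  unfold Spec_encode_int encode_int
  by_cases h : n < 0
  · have h2 : encode_int_alt (-n) = encode_int_alt_go (-n).toNat := by
      rw [encode_int_alt.eq_def, if_neg (by omega : ¬ (-n < 0))]
    rw [encode_int_alt.eq_def]
    simp [h, encode_int_go_eq, h2]
  · rw [encode_int_alt.eq_def]
    simp [h, encode_int_go_eq]
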